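-- pv_equiv track=rewrite | github.com/AntonXue/tf_logic | minecraft_attacks_utils.py | generation_not_contains_label
-- ===== SOURCE A (Python) =====
-- def generation_not_contains_label(label, generation):
--     all_targets_in_labels = [
--         t.split(".")[0].strip() for t in label.split("so I can create ")[1:]
--     ]
--     all_targets_in_labels = set(
--         ["so I can create " + target for target in all_targets_in_labels]
--     )
--     all_targets_in_generation = [
--         t.split(".")[0].strip() for t in generation.split("so I can create ")[1:]
--     ]
--     all_targets_in_generation = set(
--         ["so I can create " + target for target in all_targets_in_generation]
--     )
--
--     # Check if no target in the label is present in the generation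
--     return len(all_targets_in_labels.intersection(all_targets_in_generation)) == 0
-- ===== SOURCE B (Python) =====
-- def generation_not_contains_label(label, generation):
--     def sorted_targets(s):
--         return sorted(t.split(".")[0].strip() for t in s.split("so I can create ")[1:])
--
--     xs = sorted_targets(label)
--     ys = sorted_targets(generation)
--     # sort-then-merge: two pointers over the sorted target lists detect a
--     # shared target without building any set ("so I can create " is a fixed
--     # prefix on every target in A, so comparing the bare targets is the same)
--     i = j = 0
--     while i < len(xs) and j < len(ys):
--         if xs[i] == ys[j]:
--             return False
--         if xs[i] < ys[j]:
--             i += 1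
--         else:
--             j += 1
--     return True
-- ===== Notes on version B (the rewrite author's own statement) =====
-- stated objective: alternative
-- what changed: B replaces the two hash sets and their intersection with sort-then-merge: it sorts the bare (unprefixed) target lists of both strings and runs a two-pointer merge scan that stops at the first shared target, using no set at all.
import Mathlib
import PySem

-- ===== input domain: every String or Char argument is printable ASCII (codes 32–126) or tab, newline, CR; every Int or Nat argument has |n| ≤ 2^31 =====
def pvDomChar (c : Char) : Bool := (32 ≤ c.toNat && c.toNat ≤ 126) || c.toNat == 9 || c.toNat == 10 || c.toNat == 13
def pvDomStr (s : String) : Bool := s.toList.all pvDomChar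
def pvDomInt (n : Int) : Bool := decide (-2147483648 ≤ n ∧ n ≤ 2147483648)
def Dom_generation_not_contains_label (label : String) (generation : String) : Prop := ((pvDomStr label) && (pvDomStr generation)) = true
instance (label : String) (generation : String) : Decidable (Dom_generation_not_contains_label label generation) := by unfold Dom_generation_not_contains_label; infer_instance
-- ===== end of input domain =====

-- B replaces the hash sets and their intersection with sort-then-merge: both target lists
-- are sorted and a two-pointer scan looks for a shared target (objective: alternative).

-- ===== PORT A =====
-- 't.split(".")[0].strip()' over List Char (PySem string primitives are defined there);
-- '.headD []' is exact: Python's str.split with a non-empty separator never returns an empty list, so [0] never raises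
def pvExtract (t : List Char) : List Char :=
  PySem.Chars.strip ((PySem.Chars.splitOn t ".".toList).headD [])

def generation_not_contains_label (label : String) (generation : String) : Bool :=
  let all_targets_in_labels :=
    (PySem.List.slice (PySem.Chars.splitOn label.toList "so I can create ".toList) (some 1) none).map pvExtract
  let all_targets_in_labels :=
    PySem.Set.ofList (all_targets_in_labels.map (fun target => "so I can create ".toList ++ target))
  let all_targets_in_generation :=
    (PySem.List.slice (PySem.Chars.splitOn generation.toList "so I can create ".toList) (some 1) none).map pvExtract
  let all_targets_in_generation :=
    PySem.Set.ofList (all_targets_in_generation.map (fun target => "so I can create ".toList ++ target))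
  PySem.Set.len (PySem.Set.inter all_targets_in_labels all_targets_in_generation) == 0

-- ===== PORT B =====
-- 'sorted(t.split(".")[0].strip() for t in s.split("so I can create ")[1:])'
def pvSortedTargets (s : List Char) : List (List Char) :=
  @PySem.List.sorted _ _ List.instLinearOrder.toLT LinearOrder.toDecidableLT
    ((PySem.List.slice (PySem.Chars.splitOn s "so I can create ".toList) (some 1) none).map pvExtract)
    (fun x => x) false

-- the while-loop over indices i, j (Mathlib's List Char order is lexicographic on code points, as Python's str '<')
def pvMergeLoop (xs ys : List (List Char)) (i j : Nat) : Bool :=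
  if h : i < xs.length ∧ j < ys.length then
    if xs[i] = ys[j] then false
    else if xs[i] < ys[j] then pvMergeLoop xs ys (i + 1) j
    else pvMergeLoop xs ys i (j + 1)
  else true
termination_by (xs.length - i) + (ys.length - j)
decreasing_by all_goals omega

def generation_not_contains_label_alt (label : String) (generation : String) : Bool :=
  pvMergeLoop (pvSortedTargets label.toList) (pvSortedTargets generation.toList) 0 0

-- ===== PRECONDITION & SPEC =====
def Spec_generation_not_contains_label (label : String) (generation : String) (out : Bool) : Prop := out = generation_not_contains_label_alt label generation
instance (label : String) (generation : String) (out : Bool) : Decidable (Spec_generation_not_contains_label label generation out) := by unfold Spec_generation_not_contains_label; infer_instance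

-- ===== CLAIM (what is proved, stated in full; the proofs are below) =====
def Claim_equal_generation_not_contains_label : Prop := ∀ (label : String) (generation : String), Dom_generation_not_contains_label label generation → Spec_generation_not_contains_label label generation (generation_not_contains_label label generation)

-- ===== LEMMAS AND PROOFS =====
-- the merge scan on (suffixes of) sorted lists returns true iff the suffixes are disjoint
lemma pvMergeLoop_spec (xs ys : List (List Char)) (i j : Nat)
    (hx : (xs.drop i).Pairwise (· ≤ ·)) (hy : (ys.drop j).Pairwise (· ≤ ·)) :
    pvMergeLoop xs ys i j = true ↔ ∀ a ∈ xs.drop i, a ∉ ys.drop j := by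
  revert hx hy
  induction i, j using pvMergeLoop.induct xs ys with
  | case1 i j h heq =>
    intro hx hy
    rw [pvMergeLoop]
    rw [dif_pos h, if_pos heq]
    constructor
    · intro hf; exact absurd hf (by simp)
    · intro hall
      exact absurd (List.drop_eq_getElem_cons h.2 ▸ List.mem_cons_self)
        (heq ▸ hall _ (List.drop_eq_getElem_cons h.1 ▸ List.mem_cons_self))
  | case2 i j h hne hlt ih =>
    intro hx hy
    rw [pvMergeLoop]
    rw [dif_pos h, if_neg hne, if_pos hlt]
    rw [List.drop_eq_getElem_cons h.1] at hx ⊢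
    rw [List.pairwise_cons] at hx
    rw [ih hx.2 hy, List.forall_mem_cons]
    constructor
    · intro hr; refine ⟨?_, hr⟩
      -- xs[i] < ys[j] ≤ every element of ys.drop j, so xs[i] ∉ ys.drop j
      rw [List.drop_eq_getElem_cons h.2] at hy ⊢
      rw [List.pairwise_cons] at hy
      intro hmem
      rcases List.mem_cons.mp hmem with hh | ht
      · exact absurd (hh ▸ hlt) (lt_irrefl _)
      · exact absurd (lt_of_lt_of_le hlt (hy.1 _ ht)) (lt_irrefl _)
    · intro hr; exact hr.2
  | case3 i j h hne hnlt ih =>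
    intro hx hy
    rw [pvMergeLoop]
    rw [dif_pos h, if_neg hne, if_neg hnlt]
    rw [List.drop_eq_getElem_cons h.2] at hy ⊢
    rw [List.pairwise_cons] at hy
    rw [ih hx hy.2]
    have hylt : ys[j] < xs[i] := lt_of_le_of_ne (not_lt.mp hnlt) (Ne.symm hne)
    constructor
    · intro hr a ha
      simp only [List.mem_cons, not_or]
      refine ⟨?_, hr a ha⟩
      -- every element of xs.drop i is ≥ xs[i] > ys[j], so none equals ys[j]
      rw [List.drop_eq_getElem_cons h.1] at hx ha
      rw [List.pairwise_cons] at hx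
      rcases List.mem_cons.mp ha with hh | ht
      · exact fun hc => absurd (hc ▸ hh ▸ hylt) (lt_irrefl _)
      · exact fun hc => absurd (lt_of_lt_of_le hylt (hc ▸ hx.1 _ ht)) (lt_irrefl _)
    · intro hr a ha
      have := hr a ha
      simp only [List.mem_cons, not_or] at this
      exact this.2
  | case4 i j h =>
    intro hx hy
    rw [pvMergeLoop]
    rw [dif_neg h]
    rw [not_and_or, not_lt, not_lt] at h
    rcases h with h | h
    · simp [List.drop_eq_nil_of_le h]
    · simp [List.drop_eq_nil_of_le h]

-- prefixing every target with the fixed string changes nothing about disjointness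
lemma pv_inter_empty_iff (p : List Char) (ls gs : List (List Char)) :
    (PySem.Set.len (PySem.Set.inter (PySem.Set.ofList (ls.map (p ++ ·)))
        (PySem.Set.ofList (gs.map (p ++ ·)))) == 0) = true ↔ ∀ a ∈ ls, a ∉ gs := by
  simp only [beq_iff_eq, PySem.Set.len, Nat.cast_eq_zero, List.length_eq_zero_iff,
    List.eq_nil_iff_forall_not_mem]
  constructor
  · intro h a ha hg
    exact h (p ++ a) (by
      rw [PySem.Set.mem_inter, PySem.Set.mem_ofList, PySem.Set.mem_ofList]
      exact ⟨List.mem_map_of_mem ha, List.mem_map_of_mem hg⟩)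
  · intro h x hx
    rw [PySem.Set.mem_inter, PySem.Set.mem_ofList, PySem.Set.mem_ofList] at hx
    obtain ⟨a, ha, rfl⟩ := List.mem_map.mp hx.1
    obtain ⟨b, hb, hab⟩ := List.mem_map.mp hx.2
    exact h a ha (List.append_cancel_left hab ▸ hb)

-- ===== VERDICT (by name: the statement is the Claim_ definition above) =====
theorem generation_not_contains_label_spec : Claim_equal_generation_not_contains_label := by
  intro label generation _
  unfold Spec_generation_not_contains_label generation_not_contains_label generation_not_contains_label_alt
  set ls := (PySem.List.slice (PySem.Chars.splitOn label.toList "so I can create ".toList) (some 1) none).map pvExtract with hls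
  set gs := (PySem.List.slice (PySem.Chars.splitOn generation.toList "so I can create ".toList) (some 1) none).map pvExtract with hgs
  have hB : pvMergeLoop (pvSortedTargets label.toList) (pvSortedTargets generation.toList) 0 0 = true ↔
      ∀ a ∈ ls, a ∉ gs := by
    unfold pvSortedTargets
    rw [← hls, ← hgs]
    rw [pvMergeLoop_spec _ _ 0 0
      (by simpa using PySem.List.sorted_pairwise (κ := List Char) ls (fun x => x))
      (by simpa using PySem.List.sorted_pairwise (κ := List Char) gs (fun x => x))]
    simp only [List.drop_zero]
    constructor
    · intro h a ha hg
      exact h a ((@PySem.List.mem_sorted _ _ List.instLinearOrder.toLT LinearOrder.toDecidableLT ls (fun x => x) false a).mpr ha)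
        ((@PySem.List.mem_sorted _ _ List.instLinearOrder.toLT LinearOrder.toDecidableLT gs (fun x => x) false a).mpr hg)
    · intro h a ha hg
      exact h a ((@PySem.List.mem_sorted _ _ List.instLinearOrder.toLT LinearOrder.toDecidableLT ls (fun x => x) false a).mp ha)
        ((@PySem.List.mem_sorted _ _ List.instLinearOrder.toLT LinearOrder.toDecidableLT gs (fun x => x) false a).mp hg)
  rcases hb : pvMergeLoop (pvSortedTargets label.toList) (pvSortedTargets generation.toList) 0 0 with _ | _
  · rcases ha : (PySem.Set.len (PySem.Set.inter
        (PySem.Set.ofList (ls.map (fun target => "so I can create ".toList ++ target)))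
        (PySem.Set.ofList (gs.map (fun target => "so I can create ".toList ++ target)))) == 0) with _ | _
    · rfl
    · exact absurd (hB.mpr ((pv_inter_empty_iff _ ls gs).mp ha)) (by simp [hb])
  · exact (pv_inter_empty_iff _ ls gs).mpr (hB.mp hb)
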